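-- pv_equiv track=rewrite | github.com/Temiloluwa/resume-creator | src/build_cv.py | profile_map
-- ===== SOURCE A (Python) =====
-- from typing import Any
--
-- def profile_map(data: dict[str, Any]) -> dict[str, dict[str, str]]:
--     mapped = {
--         "linkedin": {"url": "", "username": ""},
--         "github": {"url": "", "username": ""},
--         "website": {"url": "", "username": ""},
--     }
--     profiles = data.get("basics", {}).get("profiles", [])
--     if not isinstance(profiles, list):
--         return mapped
--
--     for profile in profiles:
--         if not isinstance(profile, dict):
--             continue
--         key = str(profile.get("network", "")).lower()
--         if key in mapped:
--             mapped[key] = {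
--                 "url": str(profile.get("url", "")),
--                 "username": str(profile.get("username", "")),
--             }
--     return mapped
-- ===== SOURCE B (Python) =====
-- def profile_map(data):
--     # For each fixed network, scan the profiles from the end for the last match.
--     profiles = data.get("basics", {}).get("profiles", [])
--     if not isinstance(profiles, list):
--         profiles = []
--
--     def entry(net):
--         for profile in reversed(profiles):
--             if isinstance(profile, dict) and str(profile.get("network", "")).lower() == net:
--                 return {
--                     "url": str(profile.get("url", "")),
--                     "username": str(profile.get("username", "")),
--                 }
--         return {"url": "", "username": ""}
--
--     return {net: entry(net) for net in ("linkedin", "github", "website")}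
-- ===== Notes on version B (the rewrite author's own statement) =====
-- stated objective: alternative
-- what changed: B drops A's mutated dict entirely: for each of the three fixed networks it scans the profiles list in reverse and returns the first (i.e. last-wins) matching profile's url/username, defaulting to empty strings; no accumulator dict is built.
import Mathlib
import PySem

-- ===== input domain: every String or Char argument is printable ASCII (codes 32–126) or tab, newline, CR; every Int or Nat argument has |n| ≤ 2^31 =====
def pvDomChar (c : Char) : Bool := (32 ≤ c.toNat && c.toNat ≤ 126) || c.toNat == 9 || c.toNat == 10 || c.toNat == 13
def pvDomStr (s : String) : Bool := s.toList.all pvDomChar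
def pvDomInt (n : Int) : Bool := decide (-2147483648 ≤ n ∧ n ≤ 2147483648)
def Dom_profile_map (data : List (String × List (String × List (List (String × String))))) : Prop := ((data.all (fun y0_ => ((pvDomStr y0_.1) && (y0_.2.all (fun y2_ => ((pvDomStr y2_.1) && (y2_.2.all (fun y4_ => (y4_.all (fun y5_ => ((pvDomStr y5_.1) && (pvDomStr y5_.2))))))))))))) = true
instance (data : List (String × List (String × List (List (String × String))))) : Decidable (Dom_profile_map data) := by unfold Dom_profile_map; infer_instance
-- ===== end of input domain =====

-- B drops A's mutated dict: each of the three fixed networks is answered by a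
-- reverse scan of the profiles for its last match (objective: alternative).

-- The default entry {"url": "", "username": ""}
def pvDefaultPair : List (String × String) := [("url", ""), ("username", "")]

-- Python dict written as an association list; .get(k, dflt) = first match or default
-- (both Pythons use plain dict.get; exact via PySem.Dict first-match lookup)
def pvGetOuter (d : List (String × List (String × List (List (String × String))))) (k : String) : List (String × List (List (String × String))) :=
  (PySem.Dict.mk d).getD k []

def pvGetInner (d : List (String × List (List (String × String)))) (k : String) : List (List (String × String)) :=
  (PySem.Dict.mk d).getD k []

def pvGetProf (d : List (String × String)) (k : String) : String :=
  (PySem.Dict.mk d).getD k ""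

-- str(profile.get('network','')).lower()
def pvNetKey (p : List (String × String)) : String :=
  PySem.Str.lower (pvGetProf p "network")

-- {"url": str(...), "username": str(...)}
def pvProfPair (p : List (String × String)) : List (String × String) :=
  [("url", pvGetProf p "url"), ("username", pvGetProf p "username")]

-- ===== PORT A =====
-- A's loop body: overwrite mapped[key] only if key is already a key of mapped
def pvStepA (m : PySem.Dict String (List (String × String))) (profile : List (String × String)) : PySem.Dict String (List (String × String)) :=
  let key := pvNetKey profile
  if m.contains key then m.insert key (pvProfPair profile) else m

def profile_map (data : List (String × List (String × List (List (String × String))))) : List (String × List (String × String)) :=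
  let mapped : PySem.Dict String (List (String × String)) :=
    PySem.Dict.mk [("linkedin", pvDefaultPair), ("github", pvDefaultPair), ("website", pvDefaultPair)]
  -- profiles is a list and each profile a dict by the Lean types, so the
  -- isinstance guards of the Python cannot fire and are omitted
  let profiles := pvGetInner (pvGetOuter data "basics") "profiles"
  (profiles.foldl pvStepA mapped).items

-- ===== PORT B =====
-- B's entry(net): first match of the reversed profiles, else the empty default
def pvEntry (profiles : List (List (String × String))) (net : String) : List (String × String) :=
  match profiles.reverse.find? (fun p => pvNetKey p == net) with
  | some p => pvProfPair p
  | none => pvDefaultPair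

def profile_map_alt (data : List (String × List (String × List (List (String × String))))) : List (String × List (String × String)) :=
  let profiles := pvGetInner (pvGetOuter data "basics") "profiles"
  [("linkedin", pvEntry profiles "linkedin"),
   ("github", pvEntry profiles "github"),
   ("website", pvEntry profiles "website")]

-- ===== PRECONDITION & SPEC =====
def Spec_profile_map (data : List (String × List (String × List (List (String × String))))) (out : List (String × List (String × String))) : Prop := out = profile_map_alt data
instance (data : List (String × List (String × List (List (String × String))))) (out : List (String × List (String × String))) : Decidable (Spec_profile_map data out) := by unfold Spec_profile_map; infer_instance

-- ===== CLAIM =====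
def Claim_equal_profile_map : Prop := ∀ (data : List (String × List (String × List (List (String × String))))), Dom_profile_map data → Spec_profile_map data (profile_map data)

-- ===== LEMMAS AND PROOFS =====

-- A's fold never changes the key list of the accumulator.
theorem pv_foldA_keys (ps : List (List (String × String)))
    (m : PySem.Dict String (List (String × String))) :
    (ps.foldl pvStepA m).keys = m.keys := by
  induction ps generalizing m with
  | nil => rfl
  | cons p ps ih =>
      simp only [List.foldl]
      rw [ih]
      unfold pvStepA
      by_cases hc : m.contains (pvNetKey p) = true
      · simp only [hc, if_true]
        exact PySem.Dict.keys_insert_of_contains m (pvProfPair p) hc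
      · simp [hc]

-- For a key the accumulator already contains, A's fold ends with the pair of the
-- last matching profile, i.e. the first match of the reversed list.
theorem pv_foldA_getD (ps : List (List (String × String)))
    (m : PySem.Dict String (List (String × String))) (k : String)
    (hk : m.contains k = true) :
    (ps.foldl pvStepA m).getD k [] =
      match ps.reverse.find? (fun p => pvNetKey p == k) with
      | some p => pvProfPair p
      | none => m.getD k [] := by
  induction ps generalizing m with
  | nil => rfl
  | cons p ps ih =>
      simp only [List.foldl, List.reverse_cons]
      have hk' : (pvStepA m p).contains k = true := by
        unfold pvStepA
        by_cases hc : m.contains (pvNetKey p) = true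
        · simp [hc, PySem.Dict.contains_insert, hk]
        · simpa [hc] using hk
      rw [ih (pvStepA m p) hk', List.find?_append]
      cases hfind : ps.reverse.find? (fun q => pvNetKey q == k) with
      | some q => simp
      | none =>
          simp only [Option.none_or]
          by_cases hpk : pvNetKey p = k
          · have hc : m.contains (pvNetKey p) = true := by rw [hpk]; exact hk
            have hb : (pvNetKey p == k) = true := beq_iff_eq.mpr hpk
            simp only [List.find?, hb]
            unfold pvStepA
            rw [hpk, if_pos hk, PySem.Dict.getD_insert, if_pos rfl]
          · have hstep : (pvStepA m p).getD k [] = m.getD k [] := by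
              unfold pvStepA
              by_cases hc : m.contains (pvNetKey p) = true
              · simp only [hc, if_true, PySem.Dict.getD_insert]
                rw [if_neg (fun h => hpk h.symm)]
              · simp [hc]
            have hb : (pvNetKey p == k) = false := beq_eq_false_iff_ne.mpr hpk
            simp only [List.find?, hb]
            exact hstep

-- ===== VERDICT =====
theorem profile_map_spec : Claim_equal_profile_map := by
  intro data _
  show profile_map data = profile_map_alt data
  unfold profile_map profile_map_alt
  set m0 : PySem.Dict String (List (String × String)) :=
    PySem.Dict.mk [("linkedin", pvDefaultPair), ("github", pvDefaultPair), ("website", pvDefaultPair)] with hm0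
  set ps := pvGetInner (pvGetOuter data "basics") "profiles" with hps
  have hnd : (ps.foldl pvStepA m0).keys.Nodup := by
    rw [pv_foldA_keys]; decide
  rw [PySem.Dict.items_eq_map_keys _ hnd ([] : List (String × String)), pv_foldA_keys]
  have hent : ∀ k, m0.contains k = true → m0.getD k [] = pvDefaultPair →
      (ps.foldl pvStepA m0).getD k [] = pvEntry ps k := by
    intro k hc hd
    rw [pv_foldA_getD ps m0 k hc]
    unfold pvEntry
    cases ps.reverse.find? (fun p => pvNetKey p == k) <;> simp [hd]
  have hkeys : m0.keys = ["linkedin", "github", "website"] := by decide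
  rw [hkeys]
  simp only [List.map]
  rw [hent "linkedin" (by decide) (by decide),
      hent "github" (by decide) (by decide),
      hent "website" (by decide) (by decide)]
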